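-- pv_equiv track=rewrite | github.com/saanviagarwal864/JECRC-SAANVI_AGARWAL-6207232-JECT6FEBOFF0207 | Day_9/Problem_02.py | pair_distance_sum
-- ===== SOURCE A (Python) =====
-- def pair_distance_sum(positions, k):
--     n = len(positions)
--     total = 0
--
--     for i in range(n):
--         for j in range(i+1,n):
--             dist=positions[i]-positions[j]
--
--             if dist<0:
--                 dist=-dist
--
--             if dist%k==0:
--                 total+=dist
--
--     return total
-- ===== SOURCE B (Python) =====
-- def pair_distance_sum(positions, k):
--     # Sort once; a pair's |difference| is divisible by k iff both elements share
--     # the same residue mod k, so a single left-to-right pass with per-residue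
--     # running (count, sum) accumulates every qualifying pairwise difference.
--     total = 0
--     seen = {}  # residue -> (count, sum) of elements already passed
--     for v in sorted(positions):
--         r = v % k
--         c, s = seen.get(r, (0, 0))
--         total += c * v - s
--         seen[r] = (c + 1, s + v)
--     return total
-- ===== Notes on version B (the rewrite author's own statement) =====
-- stated objective: faster
-- what changed: Replaced the O(n^2) all-pairs scan by one global sort plus a single pass keeping per-residue (count, sum), using that |x-y| is divisible by k iff x and y have the same residue mod k.
-- outside the precondition, e.g. on pair_distance_sum([5], 0): A returns 0, B raises ZeroDivisionError
import Mathlib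
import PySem

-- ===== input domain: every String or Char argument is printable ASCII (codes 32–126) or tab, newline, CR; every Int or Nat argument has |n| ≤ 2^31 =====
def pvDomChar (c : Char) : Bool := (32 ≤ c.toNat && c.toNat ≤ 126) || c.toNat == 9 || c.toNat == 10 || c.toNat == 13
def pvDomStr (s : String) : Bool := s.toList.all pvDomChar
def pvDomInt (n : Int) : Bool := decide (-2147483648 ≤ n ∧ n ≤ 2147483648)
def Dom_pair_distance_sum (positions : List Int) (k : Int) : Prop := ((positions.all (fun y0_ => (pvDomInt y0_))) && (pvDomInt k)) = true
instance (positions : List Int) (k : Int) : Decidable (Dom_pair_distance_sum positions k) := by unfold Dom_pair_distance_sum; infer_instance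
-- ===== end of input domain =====

-- B replaces A's O(n^2) all-pairs scan by one sort plus a single pass with per-residue
-- running (count, sum); return values agree on the stated precondition (k ≠ 0).

-- ===== PORT A =====
def pair_distance_sum (positions : List Int) (k : Int) : Int :=
  let n : Int := (positions.length : Int)
  (PySem.List.pyRange 0 n 1).foldl (fun total i =>
    (PySem.List.pyRange (i + 1) n 1).foldl (fun total j =>
      let dist := PySem.List.pyGetD positions i 0 - PySem.List.pyGetD positions j 0
      let dist := if dist < 0 then -dist else dist
      if PySem.Int.mod dist k == 0 then total + dist else total) total) 0

-- ===== PORT B =====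
def pair_distance_sum_alt (positions : List Int) (k : Int) : Int :=
  ((PySem.List.sorted positions (fun x => x) false).foldl
    (fun (st : Int × PySem.Dict Int (Int × Int)) (v : Int) =>
      let r := PySem.Int.mod v k
      let cs := st.2.getD r (0, 0)
      (st.1 + cs.1 * v - cs.2, st.2.insert r (cs.1 + 1, cs.2 + v)))
    (0, PySem.Dict.empty)).1

-- ===== PRECONDITION & SPEC =====
-- Pre_ excludes k = 0, on which Python's '%' raises ZeroDivisionError (A raises as soon as
-- it reaches a pair, B as soon as positions is nonempty; A still returns 0 when k = 0 and
-- positions has fewer than two elements — those degenerate inputs are excluded too).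
def Pre_pair_distance_sum (positions : List Int) (k : Int) : Prop := k ≠ 0
instance (positions : List Int) (k : Int) : Decidable (Pre_pair_distance_sum positions k) := by
  unfold Pre_pair_distance_sum; infer_instance
def pvWitness_pair_distance_sum : List Int × Int := ([1, 4, 6, -2], 3)

def Spec_pair_distance_sum (positions : List Int) (k : Int) (out : Int) : Prop := out = pair_distance_sum_alt positions k
instance (positions : List Int) (k : Int) (out : Int) : Decidable (Spec_pair_distance_sum positions k out) := by unfold Spec_pair_distance_sum; infer_instance

-- ===== CLAIM (what is proved, stated in full; the proofs are below) =====
def Claim_equal_pair_distance_sum : Prop := ∀ (positions : List Int) (k : Int), Dom_pair_distance_sum positions k → Pre_pair_distance_sum positions k → Spec_pair_distance_sum positions k (pair_distance_sum positions k)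

-- ===== LEMMAS AND PROOFS =====

-- pair contribution, A's view: |x - y| when divisible by k
def gpair (k x y : Int) : Int := if k ∣ (x - y) then |x - y| else 0

-- sum of gpair over all ordered-by-position pairs
def pairSum (k : Int) : List Int → Int
  | [] => 0
  | x :: xs => (xs.map (gpair k x)).sum + pairSum k xs

-- pair contribution, B's view on a sorted list: later minus earlier when residues match
def hpair (k x y : Int) : Int := if PySem.Int.mod y k = PySem.Int.mod x k then y - x else 0

def psum (k : Int) : List Int → Int
  | [] => 0
  | x :: xs => (xs.map (hpair k x)).sum + psum k xs

lemma gpair_symm (k x y : Int) : gpair k x y = gpair k y x := by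
  unfold gpair
  rw [abs_sub_comm]
  by_cases h : k ∣ x - y
  · rw [if_pos h, if_pos (dvd_sub_comm.mp h)]
  · rw [if_neg h, if_neg (fun hc => h (dvd_sub_comm.mp hc))]

lemma pairSum_perm (k : Int) {l l' : List Int} (h : l.Perm l') :
    pairSum k l = pairSum k l' := by
  induction h with
  | nil => rfl
  | cons x h ih =>
      simp only [pairSum, ih, (h.map (gpair k x)).sum_eq]
  | swap x y l =>
      simp only [pairSum, List.map_cons, List.sum_cons, gpair_symm k y x]
      ring
  | trans _ _ ih1 ih2 => rw [ih1, ih2]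

lemma abs_lt_of_mod_bounds {k m : Int} (hm : k ∣ m) (hb : |m| < |k|) : m = 0 := by
  by_contra h0
  have h1 : k.natAbs ∣ m.natAbs := Int.natAbs_dvd_natAbs.mpr hm
  have h2 : k.natAbs ≤ m.natAbs := Nat.le_of_dvd (by omega) h1
  rw [Int.abs_eq_natAbs, Int.abs_eq_natAbs] at hb
  omega

lemma mod_eq_mod_iff_dvd_sub (a b k : Int) (hk : k ≠ 0) :
    (PySem.Int.mod a k = PySem.Int.mod b k) ↔ k ∣ (a - b) := by
  have ha := PySem.Int.floordiv_mul_add_mod a k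
  have hb := PySem.Int.floordiv_mul_add_mod b k
  constructor
  · intro h
    refine ⟨PySem.Int.floordiv a k - PySem.Int.floordiv b k, ?_⟩
    linear_combination -ha + hb + h
  · intro h
    have hd : k ∣ (PySem.Int.mod a k - PySem.Int.mod b k) := by
      have heq : a - b = (PySem.Int.floordiv a k - PySem.Int.floordiv b k) * k
          + (PySem.Int.mod a k - PySem.Int.mod b k) := by linear_combination -ha + hb
      have h2 : k ∣ (a - b) - (PySem.Int.floordiv a k - PySem.Int.floordiv b k) * k :=
        dvd_sub h (dvd_mul_left k _)
      rwa [heq, add_sub_cancel_left] at h2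
    have hbnd : |PySem.Int.mod a k - PySem.Int.mod b k| < |k| := by
      rcases lt_or_gt_of_ne hk with hneg | hpos
      · have b1 := PySem.Int.mod_neg_bounds a hneg
        have b2 := PySem.Int.mod_neg_bounds b hneg
        rw [abs_of_neg hneg]; rw [abs_lt]; omega
      · have b1 := PySem.Int.mod_nonneg a hpos
        have b2 := PySem.Int.mod_lt a hpos
        have b3 := PySem.Int.mod_nonneg b hpos
        have b4 := PySem.Int.mod_lt b hpos
        rw [abs_of_pos hpos]; rw [abs_lt]; omega
    have := abs_lt_of_mod_bounds hd hbnd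
    omega

lemma hpair_eq_gpair (k x y : Int) (hk : k ≠ 0) (hxy : x ≤ y) :
    hpair k x y = gpair k x y := by
  unfold hpair gpair
  simp only [mod_eq_mod_iff_dvd_sub y x k hk]
  rw [abs_sub_comm]
  by_cases h : k ∣ y - x
  · rw [if_pos h, if_pos (dvd_sub_comm.mp h), abs_of_nonneg (by omega)]
  · rw [if_neg h, if_neg (fun hc => h (dvd_sub_comm.mp hc))]

lemma psum_eq_pairSum (k : Int) (hk : k ≠ 0) (l : List Int)
    (hs : l.Pairwise (· ≤ ·)) : psum k l = pairSum k l := by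
  induction l with
  | nil => rfl
  | cons x xs ih =>
      rcases List.pairwise_cons.mp hs with ⟨hx, hxs⟩
      simp only [psum, pairSum, ih hxs]
      congr 1
      apply congrArg
      exact List.map_congr_left (fun y hy => hpair_eq_gpair k x y hk (hx y hy))

-- ===== the B side: fold invariant =====

-- cross contribution of one new element v against an already-seen prefix p
def crossOne (k : Int) (p : List Int) (v : Int) : Int :=
  ((p.filter (fun u => PySem.Int.mod u k == PySem.Int.mod v k)).map (fun u => v - u)).sum

lemma sum_map_sub (v : Int) (m : List Int) :
    (m.map (fun u => v - u)).sum = (m.length : Int) * v - m.sum := by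
  induction m with
  | nil => simp
  | cons a t ih => simp [ih]; ring

lemma foldB_invariant (k : Int) (l : List Int) : ∀ (p : List Int) (t : Int)
    (d : PySem.Dict Int (Int × Int))
    (hd : ∀ r, d.getD r (0, 0) =
      (((p.filter (fun u => PySem.Int.mod u k == r)).length : Int),
       (p.filter (fun u => PySem.Int.mod u k == r)).sum)),
    (l.foldl (fun (st : Int × PySem.Dict Int (Int × Int)) (v : Int) =>
      let r := PySem.Int.mod v k
      let cs := st.2.getD r (0, 0)
      (st.1 + cs.1 * v - cs.2, st.2.insert r (cs.1 + 1, cs.2 + v))) (t, d)).1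
    = t + (l.map (crossOne k p)).sum + psum k l := by
  induction l with
  | nil => intro p t d _; simp [psum]
  | cons v l' ih =>
      intro p t d hd
      simp only [List.foldl_cons]
      rw [ih (p ++ [v]) _ _ ?_]
      · have hcross : ∀ w : Int, crossOne k (p ++ [v]) w = crossOne k p w + hpair k v w := by
          intro w
          unfold crossOne hpair
          rw [List.filter_append]
          by_cases hres : PySem.Int.mod v k = PySem.Int.mod w k
          · simp [hres]
          · simp [hres, Ne.symm hres]
        have hmap : (l'.map (crossOne k (p ++ [v]))).sum
            = (l'.map (crossOne k p)).sum + (l'.map (hpair k v)).sum := by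
          rw [← List.sum_map_add]
          exact congrArg _ (List.map_congr_left (fun w _ => hcross w))
        rw [hmap, hd (PySem.Int.mod v k)]
        simp only [psum]
        have : crossOne k p v =
            ((p.filter (fun u => PySem.Int.mod u k == PySem.Int.mod v k)).length : Int) * v
            - (p.filter (fun u => PySem.Int.mod u k == PySem.Int.mod v k)).sum := by
          unfold crossOne; exact sum_map_sub v _
        simp only [List.map_cons, List.sum_cons]
        rw [this]
        ring
      · intro r
        rw [PySem.Dict.getD_insert]
        rw [List.filter_append]
        by_cases hr : r = PySem.Int.mod v k
        · subst hr
          simp [hd]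
        · have : (PySem.Int.mod v k == r) = false := by
            simp; exact fun h => hr h.symm
          simp [hr, this, hd]

lemma alt_eq_psum (positions : List Int) (k : Int) :
    pair_distance_sum_alt positions k = psum k (PySem.List.sorted positions (fun x => x) false) := by
  unfold pair_distance_sum_alt
  rw [foldB_invariant k _ [] 0 PySem.Dict.empty (by intro r; simp)]
  rw [show crossOne k ([] : List Int) = fun _ => (0 : Int) from funext (fun v => rfl)]
  simp

-- ===== the A side =====

lemma body_eq (k t x y : Int) :
    (if PySem.Int.mod (if x - y < 0 then -(x - y) else x - y) k == 0
      then t + (if x - y < 0 then -(x - y) else x - y) else t) = t + gpair k x y := by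
  have habs : (if x - y < 0 then -(x - y) else x - y) = |x - y| := by
    rcases lt_or_ge (x - y) 0 with h | h
    · rw [if_pos h, abs_of_neg h]
    · rw [if_neg (by omega), abs_of_nonneg h]
  rw [habs]
  unfold gpair
  by_cases hdvd : k ∣ (x - y)
  · have h0 : PySem.Int.mod |x - y| k = 0 :=
      (PySem.Int.mod_eq_zero_iff_dvd _ _).mpr ((dvd_abs _ _).mpr hdvd)
    simp [h0, hdvd]
  · have h2 : PySem.Int.mod |x - y| k ≠ 0 :=
      fun h => hdvd ((dvd_abs _ _).mp ((PySem.Int.mod_eq_zero_iff_dvd _ _).mp h))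
    simp [h2, hdvd]

lemma sumS (k : Int) (xs : List Int) :
    ((List.range xs.length).map
      (fun i => ((xs.drop (i + 1)).map (gpair k (xs.getD i 0))).sum)).sum = pairSum k xs := by
  induction xs with
  | nil => simp [pairSum]
  | cons x t ih =>
      rw [List.length_cons, List.range_succ_eq_map]
      simp only [List.map_cons, List.sum_cons, List.map_map]
      have : ((List.range t.length).map
          (fun i => (((x :: t).drop (i + 1 + 1)).map (gpair k ((x :: t).getD (i + 1) 0))).sum))
          = ((List.range t.length).map
          (fun i => ((t.drop (i + 1)).map (gpair k (t.getD i 0))).sum)) := by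
        apply List.map_congr_left
        intro i _
        rfl
      simp only [Function.comp_def, Nat.succ_eq_add_one] at *
      rw [this, ih]
      simp [pairSum]

lemma a_eq_pairSum (positions : List Int) (k : Int) :
    pair_distance_sum positions k = pairSum k positions := by
  have step1 : pair_distance_sum positions k
      = (PySem.List.pyRange 0 (positions.length : Int) 1).foldl
          (fun total i =>
            total + ((positions.drop (i + 1).toNat).map
              (gpair k (PySem.List.pyGetD positions i 0))).sum) 0 := by
    refine PySem.List.foldl_congr_mem _ _ _ 0 ?_
    intro t i hi
    have h0 : (0 : Int) ≤ i + 1 := by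
      have := (PySem.List.mem_pyRange_one.mp hi).1; omega
    calc (PySem.List.pyRange (i + 1) (positions.length : Int) 1).foldl
          (fun total j =>
            if PySem.Int.mod (if PySem.List.pyGetD positions i 0 - PySem.List.pyGetD positions j 0 < 0
                then -(PySem.List.pyGetD positions i 0 - PySem.List.pyGetD positions j 0)
                else PySem.List.pyGetD positions i 0 - PySem.List.pyGetD positions j 0) k == 0
              then total + (if PySem.List.pyGetD positions i 0 - PySem.List.pyGetD positions j 0 < 0
                then -(PySem.List.pyGetD positions i 0 - PySem.List.pyGetD positions j 0)
                else PySem.List.pyGetD positions i 0 - PySem.List.pyGetD positions j 0)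
              else total) t
        = (positions.drop (i + 1).toNat).foldl
            (fun total y =>
              if PySem.Int.mod (if PySem.List.pyGetD positions i 0 - y < 0
                  then -(PySem.List.pyGetD positions i 0 - y)
                  else PySem.List.pyGetD positions i 0 - y) k == 0
                then total + (if PySem.List.pyGetD positions i 0 - y < 0
                  then -(PySem.List.pyGetD positions i 0 - y)
                  else PySem.List.pyGetD positions i 0 - y)
                else total) t :=
          PySem.List.foldl_pyRange_pyGetD' positions 0
            (fun total y =>
              if PySem.Int.mod (if PySem.List.pyGetD positions i 0 - y < 0
                  then -(PySem.List.pyGetD positions i 0 - y)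
                  else PySem.List.pyGetD positions i 0 - y) k == 0
                then total + (if PySem.List.pyGetD positions i 0 - y < 0
                  then -(PySem.List.pyGetD positions i 0 - y)
                  else PySem.List.pyGetD positions i 0 - y)
                else total) t h0
      _ = (positions.drop (i + 1).toNat).foldl
            (fun acc y => acc + gpair k (PySem.List.pyGetD positions i 0) y) t :=
          PySem.List.foldl_congr_mem _ _ _ t
            (fun acc y _ => body_eq k acc (PySem.List.pyGetD positions i 0) y)
      _ = t + ((positions.drop (i + 1).toNat).map
            (gpair k (PySem.List.pyGetD positions i 0))).sum :=
          PySem.List.foldl_add _ _ t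
  rw [step1, PySem.List.foldl_add, PySem.List.pyRange_zero_nat, List.map_map]
  have hmap : ∀ i ∈ List.range positions.length,
      ((fun i : Int =>
          ((positions.drop (i + 1).toNat).map (gpair k (PySem.List.pyGetD positions i 0))).sum)
        ∘ (fun n : Nat => (n : Int))) i
      = (fun i : Nat => ((positions.drop (i + 1)).map (gpair k (positions.getD i 0))).sum) i := by
    intro i hi
    simp only [Function.comp_apply]
    have h1 : ((i : Int) + 1).toNat = i + 1 := by omega
    have h2 : PySem.List.pyGetD positions (i : Int) 0 = positions.getD i 0 :=
      PySem.List.pyGetD_natCast positions i 0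
    rw [h1, h2]
  rw [List.map_congr_left hmap, sumS]
  ring

-- ===== VERDICT (by name: the statement is the Claim_ definition above) =====
theorem pair_distance_sum_spec : Claim_equal_pair_distance_sum := by
  intro positions k _hdom hk
  unfold Spec_pair_distance_sum
  rw [a_eq_pairSum, alt_eq_psum,
      psum_eq_pairSum k hk _ (PySem.List.sorted_pairwise positions (fun x => x)),
      pairSum_perm k (PySem.List.sorted_perm positions (fun x => x) false)]
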